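-- pv_equiv track=rewrite | github.com/Giuzzilla/advent-of-code-2019 | day-4/day-4.py | both_stars
-- ===== SOURCE A (Python) =====
-- from collections import Counter
--
-- def both_stars(psw_range, n_star):
--     matching = 0
--     for psw in range(psw_range[0], psw_range[1]):
--         exist_double = False
--         increasing = int(''.join(sorted([i for i in str(psw)]))) != psw
--
--         digits = [int(i) for i in str(psw)]
--         count = Counter(digits)
--         for key in count.keys():
--             if n_star == 1 and count[key] >= 2:
--                 exist_double = True
--             elif n_star == 2 and count[key] == 2:
--                 exist_double = True
--
--         if increasing and exist_double:
--             matching += 1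
--
--     return matching
-- ===== SOURCE B (Python) =====
-- def both_stars(psw_range, n_star):
--     total = 0
--     for psw in range(psw_range[0], psw_range[1]):
--         t = ''.join(sorted(str(psw)))
--         if int(t) == psw:
--             continue
--         # run lengths of adjacent equal characters in the sorted digit string
--         runs = []
--         run = 1
--         for a, b in zip(t, t[1:]):
--             if a == b:
--                 run += 1
--             else:
--                 runs.append(run)
--                 run = 1
--         runs.append(run)
--         if n_star == 1:
--             ok = any(r >= 2 for r in runs)
--         elif n_star == 2:
--             ok = 2 in runs
--         else:
--             ok = False
--         if ok:
--             total += 1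
--     return total
-- ===== Notes on version B (the rewrite author's own statement) =====
-- stated objective: alternative
-- what changed: B detects repeated digits by a run-length scan of adjacent equal characters in the sorted digit string (the sort it already does for the ordering filter), replacing A's Counter dict over per-digit int() conversions and its flag-setting loop over the dict's keys.
import Mathlib
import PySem

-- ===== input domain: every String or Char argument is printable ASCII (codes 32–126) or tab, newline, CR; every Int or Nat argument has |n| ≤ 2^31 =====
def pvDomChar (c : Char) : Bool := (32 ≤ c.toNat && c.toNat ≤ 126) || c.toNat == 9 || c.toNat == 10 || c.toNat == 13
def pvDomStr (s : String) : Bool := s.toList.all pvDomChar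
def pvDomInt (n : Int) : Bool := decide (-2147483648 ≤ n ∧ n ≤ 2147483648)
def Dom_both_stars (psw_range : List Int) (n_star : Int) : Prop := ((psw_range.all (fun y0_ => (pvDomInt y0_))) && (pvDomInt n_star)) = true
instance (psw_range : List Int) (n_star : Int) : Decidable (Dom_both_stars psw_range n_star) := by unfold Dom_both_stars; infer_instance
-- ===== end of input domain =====

-- B drops A's Counter dict and per-digit int() conversions: it detects repeated digits by a
-- run-length scan of adjacent equal characters in the sorted digit string (objective: alternative;
-- return value only — neither version mutates its arguments).

-- ===== PORT A =====
-- port of Python's int(i) on a one-character string; total form via getD: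
-- under Pre_ the character is always a decimal digit, where int() returns normally
def fOfChar (c : Char) : Int := (PySem.Int.ofStr? (String.ofList [c])).getD 0

def both_stars (psw_range : List Int) (n_star : Int) : Int :=
  (PySem.List.pyRange (PySem.List.pyGetD psw_range 0 0) (PySem.List.pyGetD psw_range 1 0)).foldl
    (fun matching psw =>
      let s := (PySem.Int.toStr psw).toList
      let increasing : Bool :=
        decide (PySem.Int.ofStr? (String.ofList (PySem.List.sorted s (fun i => i))) ≠ some psw)
      let digits : List Int := s.map fOfChar
      let count : PySem.Dict Int Int := PySem.Dict.counter digits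
      let exist_double : Bool := count.keys.foldl
        (fun exist_double key =>
          if n_star = 1 ∧ count.getD key 0 ≥ 2 then true
          else if n_star = 2 ∧ count.getD key 0 = 2 then true
          else exist_double) false
      if increasing && exist_double then matching + 1 else matching) 0

-- ===== PORT B =====
-- run lengths of adjacent equal characters (Source B's zip(t, t[1:]) loop; t[1:] on a list of
-- characters is exactly List.drop 1, per PySem.List.slice_from)
def pvRunsOf (t : List Char) : List Int :=
  let st := (t.zip (t.drop 1)).foldl
    (fun (st : List Int × Int) (ab : Char × Char) =>
      if ab.1 = ab.2 then (st.1, st.2 + 1) else (st.1 ++ [st.2], 1)) ([], 1)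
  st.1 ++ [st.2]

def both_stars_alt (psw_range : List Int) (n_star : Int) : Int :=
  (PySem.List.pyRange (PySem.List.pyGetD psw_range 0 0) (PySem.List.pyGetD psw_range 1 0)).foldl
    (fun total psw =>
      let t := PySem.List.sorted (PySem.Int.toStr psw).toList (fun i => i)
      if PySem.Int.ofStr? (String.ofList t) = some psw then total
      else
        let runs := pvRunsOf t
        let ok : Bool :=
          if n_star = 1 then runs.any (fun r => decide (r ≥ 2))
          else if n_star = 2 then decide (2 ∈ runs)
          else false
        if ok then total + 1 else total) 0

-- ===== PRECONDITION & SPEC =====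
-- Pre_ excludes exactly the inputs where the Python A raises: lists with fewer than two
-- elements (IndexError on psw_range[1]) and non-empty ranges starting below 0
-- (ValueError: int('-') on the sign character of a negative number).
def Pre_both_stars (psw_range : List Int) (n_star : Int) : Prop :=
  2 ≤ psw_range.length ∧
    (0 ≤ PySem.List.pyGetD psw_range 0 0 ∨
      PySem.List.pyGetD psw_range 1 0 ≤ PySem.List.pyGetD psw_range 0 0)
instance (psw_range : List Int) (n_star : Int) : Decidable (Pre_both_stars psw_range n_star) := by
  unfold Pre_both_stars; infer_instance

def pvWitness_both_stars : List Int × Int := ([10, 30], 2)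

def Spec_both_stars (psw_range : List Int) (n_star : Int) (out : Int) : Prop := out = both_stars_alt psw_range n_star
instance (psw_range : List Int) (n_star : Int) (out : Int) : Decidable (Spec_both_stars psw_range n_star out) := by unfold Spec_both_stars; infer_instance

-- ===== CLAIM (what is proved, stated in full; the proofs are below) =====
def Claim_equal_both_stars : Prop := ∀ (psw_range : List Int) (n_star : Int), Dom_both_stars psw_range n_star → Pre_both_stars psw_range n_star → Spec_both_stars psw_range n_star (both_stars psw_range n_star)

-- ===== LEMMAS AND PROOFS =====

-- a character satisfying isDigit is one of the ten digit characters
theorem pv_digit_mem (c : Char) (h : c.isDigit = true) :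
    c ∈ ['0','1','2','3','4','5','6','7','8','9'] := by
  simp only [Char.isDigit, ge_iff_le, Bool.and_eq_true, decide_eq_true_eq] at h
  obtain ⟨h1, h2⟩ := h
  have hlo : 48 ≤ c.val.toNat := UInt32.le_iff_toNat_le.mp h1
  have hhi : c.val.toNat ≤ 57 := UInt32.le_iff_toNat_le.mp h2
  have hval : c = Char.ofNat c.val.toNat := by
    apply Char.ext
    rw [Char.ofNat, dif_pos (by omega)]
    simp [Char.ofNatAux]
    exact (UInt32.ofNatLT_toNat _).symm
  rw [hval]
  interval_cases (c.val.toNat) <;> decide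

-- str(psw) of a nonnegative number consists of digit characters
theorem pv_str_digits (psw : Int) (h : 0 ≤ psw) :
    ∀ c ∈ (PySem.Int.toStr psw).toList, c.isDigit = true := by
  intro c hc
  rw [PySem.Int.toList_toStr] at hc
  unfold PySem.Int.toChars at hc
  rw [if_neg (by omega)] at hc
  exact Nat.isDigit_of_mem_toDigits (by omega) (by omega) hc

-- int() on each single digit character, checked by computation
set_option maxRecDepth 100000 in
theorem pv_f_val : ∀ c ∈ ['0','1','2','3','4','5','6','7','8','9'],
    fOfChar c = (c.toNat : Int) - 48 := by
  intro c hc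
  fin_cases hc <;> rfl

theorem pv_f_inj : ∀ c ∈ ['0','1','2','3','4','5','6','7','8','9'],
    ∀ d ∈ ['0','1','2','3','4','5','6','7','8','9'], (fOfChar c = fOfChar d ↔ c = d) := by
  intro c hc d hd
  rw [pv_f_val c hc, pv_f_val d hd]
  constructor
  · intro h
    have : c.toNat = d.toNat := by omega
    exact Char.ext (by fin_cases hc <;> fin_cases hd <;> simp_all)
  · intro h; rw [h]

-- counting a digit in the int-mapped list equals counting its character in the string
theorem pv_count_bridge (s : List Char) (hs : ∀ c ∈ s, c.isDigit = true)
    (c : Char) (hc : c ∈ s) : (s.map fOfChar).count (fOfChar c) = s.count c := by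
  rw [List.count_eq_countP, List.countP_map, List.count_eq_countP]
  apply List.countP_congr
  intro d hd
  have h := pv_f_inj d (pv_digit_mem d (hs d hd)) c (pv_digit_mem c (hs c hc))
  simp only [Function.comp, beq_iff_eq]
  exact h

-- A's flag-setting loop is an `any` over the list
theorem pv_foldl_flag (l : List Int) (p q : Int → Prop) [DecidablePred p] [DecidablePred q]
    (b : Bool) :
    l.foldl (fun acc k => if p k then true else if q k then true else acc) b
      = (b || l.any (fun k => decide (p k) || decide (q k))) := by
  induction l generalizing b with
  | nil => simp
  | cons x xs ih =>
    simp only [List.foldl_cons, List.any_cons, ih]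
    by_cases hp : p x <;> by_cases hq : q x <;> simp [hp, hq]

-- A's exist_double flag, reduced to character-count existentials over the digit string
theorem pv_existA (n_star psw : Int) (h0 : 0 ≤ psw) :
    ((PySem.Dict.counter ((PySem.Int.toStr psw).toList.map fOfChar)).keys.foldl
      (fun exist_double key =>
        if n_star = 1 ∧ (PySem.Dict.counter ((PySem.Int.toStr psw).toList.map fOfChar)).getD key 0 ≥ 2 then true
        else if n_star = 2 ∧ (PySem.Dict.counter ((PySem.Int.toStr psw).toList.map fOfChar)).getD key 0 = 2 then true
        else exist_double) false)
      = decide ((n_star = 1 ∧ ∃ c ∈ (PySem.Int.toStr psw).toList, 2 ≤ (PySem.Int.toStr psw).toList.count c)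
          ∨ (n_star = 2 ∧ ∃ c ∈ (PySem.Int.toStr psw).toList, (PySem.Int.toStr psw).toList.count c = 2)) := by
  have hs := pv_str_digits psw h0
  rw [pv_foldl_flag, Bool.false_or, PySem.Dict.keys_counter, Bool.eq_iff_iff]
  simp only [List.any_eq_true, Bool.or_eq_true, decide_eq_true_eq, PySem.Set.mem_ofList,
    List.mem_map, PySem.Dict.getD_counter]
  constructor
  · rintro ⟨k, ⟨c, hc, rfl⟩, hk⟩
    rcases hk with ⟨h1, hge⟩ | ⟨h2, heq⟩
    · refine Or.inl ⟨h1, c, hc, ?_⟩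
      rw [pv_count_bridge _ hs c hc] at hge
      exact_mod_cast hge
    · refine Or.inr ⟨h2, c, hc, ?_⟩
      rw [pv_count_bridge _ hs c hc] at heq
      exact_mod_cast heq
  · rintro (⟨h1, c, hc, hge⟩ | ⟨h2, c, hc, heq⟩)
    · refine ⟨fOfChar c, ⟨c, hc, rfl⟩, Or.inl ⟨h1, ?_⟩⟩
      rw [pv_count_bridge _ hs c hc]
      exact_mod_cast hge
    · refine ⟨fOfChar c, ⟨c, hc, rfl⟩, Or.inr ⟨h2, ?_⟩⟩
      rw [pv_count_bridge _ hs c hc]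
      exact_mod_cast heq

-- recursive form of Source B's run-length loop (proof helper)
def pvRl : Char → List Char → Int → List Int
  | _, [], run => [run]
  | a, y :: r, run => if a = y then pvRl y r (run + 1) else run :: pvRl y r 1

-- the zip-foldl of pvRunsOf is pvRl
theorem pv_foldl_rl (t : List Char) : ∀ (a : Char) (runs : List Int) (run : Int),
    (let st := ((a :: t).zip t).foldl
      (fun (st : List Int × Int) (ab : Char × Char) =>
        if ab.1 = ab.2 then (st.1, st.2 + 1) else (st.1 ++ [st.2], 1)) (runs, run)
     st.1 ++ [st.2]) = runs ++ pvRl a t run := by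
  induction t with
  | nil => intro a runs run; simp [pvRl]
  | cons y r ih =>
    intro a runs run
    simp only [List.zip_cons_cons, List.foldl_cons, pvRl]
    by_cases h : a = y
    · simpa [h] using ih y runs (run + 1)
    · simpa [h] using (ih y (runs ++ [run]) 1).trans (by simp)

-- canonical run-length decomposition (proof spec)
def pvRunsSpec : List Char → List Int
  | [] => []
  | a :: t => (((t.takeWhile (fun y => a == y)).length : Int) + 1) ::
      pvRunsSpec (t.dropWhile (fun y => a == y))
termination_by l => l.length
decreasing_by
  simp only [List.length_cons]
  exact Nat.lt_succ_of_le (List.length_dropWhile_le _ _)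

theorem pv_rl_spec (t : List Char) : ∀ (a : Char) (run : Int),
    pvRl a t run = (run + ((t.takeWhile (fun y => a == y)).length : Int)) ::
      pvRunsSpec (t.dropWhile (fun y => a == y)) := by
  induction t with
  | nil => intro a run; simp [pvRl, pvRunsSpec]
  | cons y r ih =>
    intro a run
    by_cases h : a = y
    · subst h
      simp only [pvRl, ih, List.takeWhile_cons, BEq.rfl, List.dropWhile_cons]
      push_cast [List.length_cons]
      ring_nf
    · have hb : (a == y) = false := by simp [h]
      simp only [pvRl, if_neg h, List.takeWhile_cons, hb, List.dropWhile_cons,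
        Bool.false_eq_true, if_false, List.length_nil, pvRunsSpec, ih y 1]
      have hcomm : (1 : Int) + ((r.takeWhile (fun z => y == z)).length : Int)
          = ((r.takeWhile (fun z => y == z)).length : Int) + 1 := by ring
      rw [hcomm]
      simp

theorem pv_runsOf_eq_spec (a : Char) (t : List Char) :
    pvRunsOf (a :: t) = pvRunsSpec (a :: t) := by
  have h := pv_foldl_rl t a [] 1
  simp only [pvRunsOf, List.drop_one, List.tail_cons] at *
  rw [h, List.nil_append, pv_rl_spec, pvRunsSpec]
  congr 1
  ring

-- in a sorted list headed by a, the count of a in the tail is the leading run of a's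
theorem pv_count_head (a : Char) (u : List Char)
    (hu : u.Pairwise (fun x y : Char => x ≤ y)) (ha : ∀ z ∈ u, a ≤ z) :
    u.count a = (u.takeWhile (fun y => a == y)).length := by
  induction u with
  | nil => simp
  | cons y r ih =>
    have hy := ha y (by simp)
    rcases List.pairwise_cons.mp hu with ⟨hyr, hr⟩
    by_cases h : a = y
    · subst h
      simp only [List.count_cons_self, List.takeWhile_cons, BEq.rfl, if_pos, List.length_cons]
      rw [ih hr hyr]
    · have hlt : a < y := lt_of_le_of_ne hy h
      have hnot : a ∉ r := fun hmem => absurd (lt_of_lt_of_le hlt (hyr a hmem)) (lt_irrefl a)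
      have hb : (a == y) = false := by simp [h]
      simp [Ne.symm h, List.count_eq_zero.mpr hnot, hb]

-- counts are unchanged when passing from a sorted list to the part after its leading run
theorem pv_count_drop (a : Char) (u : List Char)
    (hu : u.Pairwise (fun x y : Char => x ≤ y)) (ha : ∀ z ∈ u, a ≤ z) :
    ∀ c ∈ u.dropWhile (fun y => a == y),
      (a :: u).count c = (u.dropWhile (fun y => a == y)).count c := by
  intro c hc
  have hgt : a < c := by
    rcases hd : u.dropWhile (fun y => a == y) with _ | ⟨y0, rest⟩
    · rw [hd] at hc; cases hc
    · have hy0ne : ¬ (a == y0) = true := by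
        have := List.head?_dropWhile_not (fun y => a == y) u
        rw [hd] at this; simpa using this
      have hy0u : y0 ∈ u := (List.dropWhile_sublist _).mem (by rw [hd]; simp)
      have hay0 : a < y0 := lt_of_le_of_ne (ha y0 hy0u) (by simpa using hy0ne)
      rw [hd] at hc
      rcases List.mem_cons.mp hc with rfl | hcr
      · exact hay0
      · have hpd : (u.dropWhile (fun y => a == y)).Pairwise (fun x y : Char => x ≤ y) :=
          hu.sublist (List.dropWhile_sublist _)
        rw [hd] at hpd
        exact lt_of_lt_of_le hay0 ((List.pairwise_cons.mp hpd).1 c hcr)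
  have hca : c ≠ a := fun h => absurd (h ▸ hgt) (lt_irrefl a)
  have hctw : c ∉ u.takeWhile (fun y => a == y) := by
    intro hmem
    have := List.mem_takeWhile_imp hmem
    exact hca ((by simpa using this : a = c).symm)
  conv_lhs => rw [← List.takeWhile_append_dropWhile (p := fun y => a == y) (l := u)]
  rw [← List.cons_append, List.count_append]
  rw [List.count_eq_zero.mpr (by simp [hca, hctw] : c ∉ a :: u.takeWhile (fun y => a == y))]
  ring

-- membership in the run-length list of a sorted list is exactly being a multiplicity
theorem pv_runsSpec_mem (t : List Char) (ht : t.Pairwise (fun x y : Char => x ≤ y)) (r : Int) :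
    r ∈ pvRunsSpec t ↔ ∃ c ∈ t, (t.count c : Int) = r := by
  induction t using pvRunsSpec.induct with
  | case1 => simp [pvRunsSpec]
  | case2 a u ih =>
    rcases List.pairwise_cons.mp ht with ⟨hau, hu⟩
    have hcnt : (a :: u).count a = (u.takeWhile (fun y => a == y)).length + 1 := by
      rw [List.count_cons_self, pv_count_head a u hu hau]
    have hpd : (u.dropWhile (fun y => a == y)).Pairwise (fun x y : Char => x ≤ y) :=
      hu.sublist (List.dropWhile_sublist _)
    rw [pvRunsSpec, List.mem_cons, ih hpd]
    constructor
    · rintro (rfl | ⟨c, hc, hcr⟩)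
      · exact ⟨a, by simp, by rw [hcnt]; push_cast; ring⟩
      · refine ⟨c, List.mem_cons_of_mem a ((List.dropWhile_sublist _).mem hc), ?_⟩
        rw [pv_count_drop a u hu hau c hc]
        exact hcr
    · rintro ⟨c, hc, hcr⟩
      rcases List.mem_cons.mp hc with rfl | hcu
      · left; rw [← hcr, hcnt]; push_cast; ring
      · by_cases hca : c = a
        · subst hca; left; rw [← hcr, hcnt]; push_cast; ring
        · have hcd : c ∈ u.dropWhile (fun y => a == y) := by
            have : c ∈ u.takeWhile (fun y => a == y) ++ u.dropWhile (fun y => a == y) := by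
              rw [List.takeWhile_append_dropWhile]; exact hcu
            rcases List.mem_append.mp this with htw | hdw
            · exact absurd ((by simpa using List.mem_takeWhile_imp htw : a = c).symm) hca
            · exact hdw
          right
          exact ⟨c, hcd, by rw [← pv_count_drop a u hu hau c hcd]; exact hcr⟩

-- B's ok flag over the sorted digit string, as the same character-count existentials
theorem pv_okB (n_star psw : Int) :
    (if n_star = 1 then
        (pvRunsOf (PySem.List.sorted (PySem.Int.toStr psw).toList (fun i => i))).any
          (fun r => decide (r ≥ 2))
      else if n_star = 2 then
        decide (2 ∈ pvRunsOf (PySem.List.sorted (PySem.Int.toStr psw).toList (fun i => i)))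
      else false)
      = decide ((n_star = 1 ∧ ∃ c ∈ (PySem.Int.toStr psw).toList, 2 ≤ (PySem.Int.toStr psw).toList.count c)
          ∨ (n_star = 2 ∧ ∃ c ∈ (PySem.Int.toStr psw).toList, (PySem.Int.toStr psw).toList.count c = 2)) := by
  set s := (PySem.Int.toStr psw).toList with hsdef
  set t := PySem.List.sorted s (fun i => i) with htdef
  have hperm : t.Perm s := PySem.List.sorted_perm s (fun i => i) false
  have hpair : t.Pairwise (fun x y : Char => x ≤ y) := by
    simpa using PySem.List.sorted_pairwise s (fun i : Char => i)
  have hmemrun : ∀ r : Int, 2 ≤ r → (r ∈ pvRunsOf t ↔ ∃ c ∈ s, (s.count c : Int) = r) := by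
    intro r hr2
    rcases ht0 : t with _ | ⟨a, u⟩
    · have hs0 : s = [] := (PySem.List.sorted_eq_nil_iff s (fun i => i) false).mp ht0
      constructor
      · intro hr
        simp [pvRunsOf] at hr
        omega
      · rintro ⟨c, hc, -⟩; rw [hs0] at hc; cases hc
    · rw [pv_runsOf_eq_spec, pv_runsSpec_mem _ (ht0 ▸ hpair) r]
      constructor
      · rintro ⟨c, hc, hcr⟩
        exact ⟨c, hperm.mem_iff.mp (ht0 ▸ hc), by rw [← hperm.count_eq, ht0]; exact hcr⟩
      · rintro ⟨c, hc, hcr⟩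
        exact ⟨c, ht0 ▸ hperm.mem_iff.mpr hc, by rw [← ht0, hperm.count_eq]; exact hcr⟩
  by_cases h1 : n_star = 1
  · subst h1
    rw [if_pos rfl, Bool.eq_iff_iff]
    simp only [List.any_eq_true, decide_eq_true_eq]
    constructor
    · rintro ⟨r, hr, hge⟩
      rcases (hmemrun r hge).mp hr with ⟨c, hc, hcr⟩
      exact Or.inl ⟨trivial, c, hc, by exact_mod_cast hcr ▸ hge⟩
    · rintro (⟨-, c, hc, hge⟩ | ⟨h21, -⟩)
      · exact ⟨(s.count c : Int), (hmemrun _ (by exact_mod_cast hge)).mpr ⟨c, hc, rfl⟩, by exact_mod_cast hge⟩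
      · exact absurd h21 (by norm_num)
  · rw [if_neg h1]
    by_cases h2 : n_star = 2
    · subst h2
      rw [if_pos rfl, Bool.eq_iff_iff]
      simp only [decide_eq_true_eq]
      constructor
      · intro hr
        rcases (hmemrun 2 le_rfl).mp hr with ⟨c, hc, hcr⟩
        exact Or.inr ⟨trivial, c, hc, by exact_mod_cast hcr⟩
      · rintro (⟨h12, -⟩ | ⟨-, c, hc, hceq⟩)
        · exact absurd h12 (by norm_num)
        · exact (hmemrun 2 le_rfl).mpr ⟨c, hc, by exact_mod_cast hceq⟩
    · rw [if_neg h2]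
      simp [h1, h2]

-- ===== VERDICT (by name: the statement is the Claim_ definition above) =====
theorem both_stars_spec : Claim_equal_both_stars := by
  intro psw_range n_star _ hpre
  unfold Spec_both_stars both_stars both_stars_alt
  apply PySem.List.foldl_congr_mem
  intro acc psw hpsw
  rw [PySem.List.mem_pyRange_one] at hpsw
  have h0 : 0 ≤ psw := by
    unfold Pre_both_stars at hpre
    omega
  simp only []
  rw [pv_existA n_star psw h0, pv_okB n_star psw]
  simp only [PySem.Int.ofStr?_ofList, PySem.Int.toList_toStr]
  by_cases heq : PySem.Int.ofChars? (PySem.List.sorted (PySem.Int.toChars psw) (fun i => i)) = some psw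
  · simp [heq]
  · simp [heq]
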